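-- pv_equiv track=rewrite | github.com/ArseniiStratiuk/Graphs-Lab | lab.py | adjacency_dict_radius
-- ===== SOURCE A (Python) =====
-- def adjacency_dict_radius(graph: dict[int, list[int]]) -> int:
--     """
--     Calculate the radius of the graph.
--
--     Args:
--         graph (dict): The adjacency dictionary of a given graph.
--
--     Returns:
--         int: The radius of the graph.
--
--     >>> adjacency_dict_radius({0: [1, 2], 1: [0, 2], 2: [0, 1]})
--     1
--     >>> adjacency_dict_radius({0: [1, 2], 1: [0, 2], 2: [0, 1], 3: [1]})
--     1
--     """
--     def get_distances(start: int) -> list[int]: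
--         """Find the distances of the vertex using BFS."""
--         distances = {}
--         distances[start] = 0
--         queue = [start]
--
--         while queue:
--             vertex = queue.pop(0)
--
--             for neighbor in graph.get(vertex, []):
--                 if neighbor not in distances:
--                     distances[neighbor] = distances[vertex] + 1
--                     queue.append(neighbor)
--
--         return distances
--
--     eccentricities = [max(get_distances(v).values()) for v in graph]
--
--     return min(eccentricities)
-- ===== SOURCE B (Python) =====
-- def adjacency_dict_radius(graph: dict[int, list[int]]) -> int:
--     """Radius via Bellman-Ford: per start vertex, run n rounds of synchronous
--     edge relaxation over the whole edge list (no BFS queue/frontier), then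
--     take the max finite distance; the radius is the min over start vertices."""
--     verts = set(graph)
--     for ws in graph.values():
--         verts.update(ws)
--     n = len(verts)
--
--     def eccentricity(start: int) -> int:
--         d = {start: 0}
--         for _ in range(n):
--             nd = dict(d)
--             for v, ws in graph.items():
--                 if v in d:
--                     for w in ws:
--                         c = d[v] + 1
--                         if w not in nd or c < nd[w]:
--                             nd[w] = c
--             if nd == d:
--                 break
--             d = nd
--         return max(d.values())
--
--     return min(eccentricity(v) for v in graph)
-- ===== Notes on version B (the rewrite author's own statement) =====
-- stated objective: alternative
-- what changed: A computes each eccentricity by a FIFO-queue BFS (list.pop(0)) that records a per-vertex distance dict and takes max of its values; B instead builds the vertex universe once and runs synchronous Bellman-Ford edge relaxation (scan every adjacency-list edge each round, relax dist[w] = min(dist[w], dist[v]+1), stop at the fixpoint or after n rounds) with no queue, no frontier and no visited set.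
import Mathlib
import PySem

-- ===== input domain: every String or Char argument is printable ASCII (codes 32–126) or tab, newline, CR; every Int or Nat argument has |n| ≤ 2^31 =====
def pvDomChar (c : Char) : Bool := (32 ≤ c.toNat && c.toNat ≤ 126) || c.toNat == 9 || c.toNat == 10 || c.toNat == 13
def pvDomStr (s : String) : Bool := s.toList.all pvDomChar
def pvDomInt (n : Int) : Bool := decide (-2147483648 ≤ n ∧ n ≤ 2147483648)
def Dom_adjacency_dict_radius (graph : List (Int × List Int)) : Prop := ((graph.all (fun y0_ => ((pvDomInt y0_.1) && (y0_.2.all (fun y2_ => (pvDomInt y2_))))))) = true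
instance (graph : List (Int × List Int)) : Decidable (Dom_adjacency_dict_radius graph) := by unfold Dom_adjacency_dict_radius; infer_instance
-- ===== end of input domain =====

-- B replaces A's per-vertex FIFO-queue BFS (distance dict + queue) by synchronous
-- Bellman-Ford relaxation: n rounds scanning every edge of the adjacency dict
-- (objective: alternative algorithm — no queue, no frontier, no visited set).

-- ===== PORT A =====
-- helpers: Python's graph.get(v, []) and the termination measures for the BFS loop
def pvNbrs (graph : List (Int × List Int)) (v : Int) : List Int :=
  (PySem.Dict.mk graph).getD v []

def pvUniv (graph : List (Int × List Int)) : List Int :=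
  graph.map Prod.fst ++ graph.flatMap Prod.snd

def pvMissD (graph : List (Int × List Int)) (d : PySem.Dict Int Int) : Nat :=
  (pvUniv graph).countP (fun x => !(d.contains x))

def pvStepA (v : Int) (s : PySem.Dict Int Int × List Int) (w : Int) : PySem.Dict Int Int × List Int :=
  if s.1.contains w then s else (s.1.insert w (s.1.getD v 0 + 1), s.2 ++ [w])

theorem pvCountP_lt {l : List Int} {p q : Int → Bool} (h : ∀ a ∈ l, q a = true → p a = true)
    (w : Int) (hw : w ∈ l) (hp : p w = true) (hq : q w = false) :
    l.countP q < l.countP p := by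
  induction l with
  | nil => cases hw
  | cons x t ih =>
    simp only [List.countP_cons]
    rcases List.mem_cons.mp hw with hw | hw
    · subst hw
      have hle : t.countP q ≤ t.countP p :=
        List.countP_mono_left (fun a ha => h a (List.mem_cons_of_mem _ ha))
      simp only [hp, hq]
      simp
      omega
    · have hx : q x = true → p x = true := h x (List.mem_cons_self)
      have := ih (fun a ha => h a (List.mem_cons_of_mem _ ha)) hw
      rcases hqx : q x with _|_ <;> rcases hpx : p x with _|_ <;>
        first
          | (simp_all; omega)
          | simp_all

theorem pvNbrs_sub (graph : List (Int × List Int)) (v w : Int)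
    (h : w ∈ pvNbrs graph v) : w ∈ graph.flatMap Prod.snd := by
  unfold pvNbrs at h
  rw [PySem.Dict.getD_eq_get?_getD] at h
  cases hg : (PySem.Dict.mk graph).get? v with
  | none => rw [hg] at h; simp at h
  | some l =>
    rw [hg] at h
    have := PySem.Dict.mem_items_of_get?_eq_some _ hg
    exact List.mem_flatMap.mpr ⟨(v, l), this, h⟩

theorem pvContains_stepA (v : Int) (s : PySem.Dict Int Int × List Int) (w x : Int)
    (h : s.1.contains x = true) : ((pvStepA v s w).1).contains x = true := by
  unfold pvStepA
  split
  · exact h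
  · simp [PySem.Dict.contains_insert, h]

theorem pvMissD_foldA_le (graph : List (Int × List Int)) (nbrs : List Int) (v : Int)
    (s : PySem.Dict Int Int × List Int) :
    pvMissD graph (nbrs.foldl (pvStepA v) s).1 ≤ pvMissD graph s.1 := by
  induction nbrs generalizing s with
  | nil => exact le_refl _
  | cons w t ih =>
    refine le_trans (ih (pvStepA v s w)) ?_
    apply List.countP_mono_left
    intro a _ ha
    simp only [Bool.not_eq_true'] at ha ⊢
    cases hc : s.1.contains a
    · rfl
    · rw [pvContains_stepA v s w a hc] at ha; cases ha

theorem pvFoldA_spec (graph : List (Int × List Int)) (nbrs : List Int) (v : Int)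
    (hnb : ∀ w ∈ nbrs, w ∈ pvUniv graph) (s : PySem.Dict Int Int × List Int) :
    nbrs.foldl (pvStepA v) s = s ∨ pvMissD graph (nbrs.foldl (pvStepA v) s).1 < pvMissD graph s.1 := by
  induction nbrs generalizing s with
  | nil => exact Or.inl rfl
  | cons w t ih =>
    have hw : w ∈ pvUniv graph := hnb w (by simp)
    have hnb' : ∀ x ∈ t, x ∈ pvUniv graph := fun x hx => hnb x (by simp [hx])
    simp only [List.foldl_cons]
    cases hc : s.1.contains w with
    | true =>
      have : pvStepA v s w = s := by unfold pvStepA; simp [hc]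
      rw [this]; exact ih hnb' s
    | false =>
      right
      have hstep : pvMissD graph (pvStepA v s w).1 < pvMissD graph s.1 := by
        unfold pvStepA
        simp only [hc, if_neg Bool.false_ne_true]
        apply pvCountP_lt (p := fun x => !(s.1.contains x)) _ w hw
        · simp [hc]
        · simp
        · intro a _ ha
          simp only [Bool.not_eq_true'] at ha ⊢
          simp only [PySem.Dict.contains_insert, Bool.or_eq_false_iff] at ha
          exact ha.2
      exact lt_of_le_of_lt (pvMissD_foldA_le graph t v _) hstep

def pvBfsA (graph : List (Int × List Int)) (d : PySem.Dict Int Int) (queue : List Int) : PySem.Dict Int Int :=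
  match queue with
  | [] => d
  | v :: rest =>
    let st := (pvNbrs graph v).foldl (pvStepA v) (d, rest)
    pvBfsA graph st.1 st.2
termination_by (pvMissD graph d, queue.length)
decreasing_by
  have hnb : ∀ w ∈ pvNbrs graph v, w ∈ pvUniv graph := fun w hw =>
    List.mem_append_right _ (pvNbrs_sub graph v w hw)
  rcases pvFoldA_spec graph (pvNbrs graph v) v hnb (d, rest) with h | h
  · rw [h]; right; simp
  · left; exact h

def adjacency_dict_radius (graph : List (Int × List Int)) : Int :=
  -- eccentricities = [max(get_distances(v).values()) for v in graph]; values is never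
  -- empty (the start vertex is always in distances), so Python's max never raises
  let eccentricities := (PySem.Dict.mk graph).keys.map (fun v =>
    (PySem.List.max? (PySem.Dict.values
        (pvBfsA graph ((PySem.Dict.empty : PySem.Dict Int Int).insert v 0) [v]))
      (fun x => x)).getD 0)
  (PySem.List.min? eccentricities (fun x => x)).getD 0

-- ===== PORT B =====
-- Bellman-Ford: nd[w] = min(nd[w], d[v]+1) for every listed edge (v, w), n rounds
def pvRelaxStep (dv : Int) (nd : PySem.Dict Int Int) (w : Int) : PySem.Dict Int Int :=
  match nd.get? w with
  | none => nd.insert w (dv + 1)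
  | some old => if dv + 1 < old then nd.insert w (dv + 1) else nd

def pvRelaxItem (d : PySem.Dict Int Int) (nd : PySem.Dict Int Int) (p : Int × List Int) : PySem.Dict Int Int :=
  match d.get? p.1 with
  | some dv => p.2.foldl (pvRelaxStep dv) nd
  | none => nd

def pvRelax (graph : List (Int × List Int)) (d : PySem.Dict Int Int) : PySem.Dict Int Int :=
  ((PySem.Dict.mk graph).items).foldl (pvRelaxItem d) d

def pvRounds (graph : List (Int × List Int)) : Nat → PySem.Dict Int Int → PySem.Dict Int Int
  | 0, d => d
  | m + 1, d =>
    let nd := pvRelax graph d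
    -- Python's 'if nd == d: break': nd starts as dict(d) and is only ever changed by a
    -- strict relaxation, so content equality coincides with literal (items) equality
    if nd = d then d else pvRounds graph m nd

def pvVertsB (graph : List (Int × List Int)) : List Int :=
  ((PySem.Dict.mk graph).values).foldl (fun s ws => PySem.Set.update s ws)
    (PySem.Set.ofList ((PySem.Dict.mk graph).keys))

def pvEccB (graph : List (Int × List Int)) (n : Nat) (start : Int) : Int :=
  -- d = {start: 0}; up to n relaxation rounds with early exit at the fixpoint;
  -- max(d.values()) (never empty: start stays in d)
  (PySem.List.max? (PySem.Dict.values
      (pvRounds graph n ((PySem.Dict.empty : PySem.Dict Int Int).insert start 0)))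
    (fun x => x)).getD 0

def adjacency_dict_radius_alt (graph : List (Int × List Int)) : Int :=
  let n := (pvVertsB graph).length
  (PySem.List.min? ((PySem.Dict.mk graph).keys.map (fun v => pvEccB graph n v))
    (fun x => x)).getD 0

-- ===== PRECONDITION & SPEC =====
-- Pre_ excludes the empty dict, on which Python's min() raises ValueError, and association
-- lists with duplicate keys, where Python's dict construction collapses duplicates (last value
-- wins) so the assoc-list first-match convention matches neither Python program's input.
def Pre_adjacency_dict_radius (graph : List (Int × List Int)) : Prop :=
  graph ≠ [] ∧ (graph.map Prod.fst).Nodup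
instance (graph : List (Int × List Int)) : Decidable (Pre_adjacency_dict_radius graph) := by unfold Pre_adjacency_dict_radius; infer_instance

def pvWitness_adjacency_dict_radius : (List (Int × List Int)) := [(0, [1]), (1, [0])]

def Spec_adjacency_dict_radius (graph : List (Int × List Int)) (out : Int) : Prop := out = adjacency_dict_radius_alt graph
instance (graph : List (Int × List Int)) (out : Int) : Decidable (Spec_adjacency_dict_radius graph out) := by unfold Spec_adjacency_dict_radius; infer_instance

-- ===== CLAIM (what is proved, stated in full; the proofs are below) =====
def Claim_equal_adjacency_dict_radius : Prop := ∀ (graph : List (Int × List Int)), Dom_adjacency_dict_radius graph → Pre_adjacency_dict_radius graph → Spec_adjacency_dict_radius graph (adjacency_dict_radius graph)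

-- ===== LEMMAS AND PROOFS =====
-- Proof plan: A's BFS equals a level-synchronous BFS 'pvLevels' (first half, pvMain/pvEcc);
-- B's Bellman-Ford rounds advance in lockstep with those levels (second half, pvSync).

-- level-synchronous BFS used as the common reference point
def pvStepB (s : List Int × List Int) (w : Int) : List Int × List Int :=
  if PySem.Set.contains s.1 w then s else (PySem.Set.add s.1 w, s.2 ++ [w])

def pvMissS (graph : List (Int × List Int)) (vis : List Int) : Nat :=
  (pvUniv graph).countP (fun x => !(decide (x ∈ vis)))

theorem pvStepB_of_mem (s : List Int × List Int) (w : Int) (h : w ∈ s.1) :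
    pvStepB s w = s := by
  unfold pvStepB
  simp [PySem.Set.contains, h]

theorem pvStepB_of_not_mem (s : List Int × List Int) (w : Int) (h : w ∉ s.1) :
    pvStepB s w = (s.1 ++ [w], s.2 ++ [w]) := by
  unfold pvStepB PySem.Set.add
  simp [PySem.Set.contains, h]

theorem pvMem_stepB (s : List Int × List Int) (w x : Int)
    (h : x ∈ s.1) : x ∈ (pvStepB s w).1 := by
  by_cases hw : w ∈ s.1
  · rw [pvStepB_of_mem s w hw]; exact h
  · rw [pvStepB_of_not_mem s w hw]; exact List.mem_append_left _ h

theorem pvMissS_foldB_le (graph : List (Int × List Int)) (nbrs : List Int)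
    (s : List Int × List Int) :
    pvMissS graph (nbrs.foldl pvStepB s).1 ≤ pvMissS graph s.1 := by
  induction nbrs generalizing s with
  | nil => exact le_refl _
  | cons w t ih =>
    refine le_trans (ih (pvStepB s w)) ?_
    apply List.countP_mono_left
    intro a _ ha
    simp only [Bool.not_eq_true', decide_eq_false_iff_not] at ha ⊢
    exact fun hmem => ha (pvMem_stepB s w a hmem)

theorem pvFoldB_spec (graph : List (Int × List Int)) (nbrs : List Int)
    (hnb : ∀ w ∈ nbrs, w ∈ pvUniv graph) (s : List Int × List Int) :
    nbrs.foldl pvStepB s = s ∨ pvMissS graph (nbrs.foldl pvStepB s).1 < pvMissS graph s.1 := by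
  induction nbrs generalizing s with
  | nil => exact Or.inl rfl
  | cons w t ih =>
    have hw : w ∈ pvUniv graph := hnb w (by simp)
    have hnb' : ∀ x ∈ t, x ∈ pvUniv graph := fun x hx => hnb x (by simp [hx])
    simp only [List.foldl_cons]
    by_cases hc : w ∈ s.1
    · rw [pvStepB_of_mem s w hc]; exact ih hnb' s
    · right
      have hstep : pvMissS graph (pvStepB s w).1 < pvMissS graph s.1 := by
        rw [pvStepB_of_not_mem s w hc]
        apply pvCountP_lt (p := fun x => !(decide (x ∈ s.1))) _ w hw
        · simp [hc]
        · simp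
        · intro a _ ha
          simp only [Bool.not_eq_true', decide_eq_false_iff_not] at ha ⊢
          exact fun hmem => ha (List.mem_append_left _ hmem)
      exact lt_of_le_of_lt (pvMissS_foldB_le graph t _) hstep

def pvLevelB (graph : List (Int × List Int)) (s : List Int × List Int) (v : Int) : List Int × List Int :=
  (pvNbrs graph v).foldl pvStepB s

theorem pvMissS_foldBF_le (graph : List (Int × List Int)) (F : List Int)
    (s : List Int × List Int) :
    pvMissS graph (F.foldl (pvLevelB graph) s).1 ≤ pvMissS graph s.1 := by
  induction F generalizing s with
  | nil => exact le_refl _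
  | cons v t ih =>
    exact le_trans (ih (pvLevelB graph s v)) (pvMissS_foldB_le graph (pvNbrs graph v) s)

theorem pvFoldBF_spec (graph : List (Int × List Int)) (F : List Int)
    (s : List Int × List Int) :
    F.foldl (pvLevelB graph) s = s ∨ pvMissS graph (F.foldl (pvLevelB graph) s).1 < pvMissS graph s.1 := by
  induction F generalizing s with
  | nil => exact Or.inl rfl
  | cons v t ih =>
    have hnb : ∀ w ∈ pvNbrs graph v, w ∈ pvUniv graph := fun w hw =>
      List.mem_append_right _ (pvNbrs_sub graph v w hw)
    simp only [List.foldl_cons]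
    rcases pvFoldB_spec graph (pvNbrs graph v) hnb s with h | h
    · rw [show pvLevelB graph s v = s from h]; exact ih s
    · exact Or.inr (lt_of_le_of_lt (pvMissS_foldBF_le graph t _) h)

def pvLevelFold (graph : List (Int × List Int)) (visited : List Int) (frontier : List Int) : List Int × List Int :=
  frontier.foldl (pvLevelB graph) (visited, [])

def pvLevels (graph : List (Int × List Int)) (visited : List Int) (frontier : List Int) (k : Int) : Int :=
  let st := pvLevelFold graph visited frontier
  if h : st.2 = [] then k else pvLevels graph st.1 st.2 (k + 1)
termination_by pvMissS graph visited
decreasing_by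
  have h' : ¬ (List.foldl (pvLevelB graph) (visited, []) frontier).2 = [] := h
  rcases pvFoldBF_spec graph frontier (visited, []) with h2 | h2
  · rw [h2] at h'; simp at h'
  · exact h2

-- ===== first half: A's queue BFS computes the level BFS value =====

theorem pvGet?_mk_append (l1 l2 : List (Int × Int)) (x : Int) :
    (PySem.Dict.mk (l1 ++ l2)).get? x =
      match (PySem.Dict.mk l1).get? x with
      | some y => some y
      | none => (PySem.Dict.mk l2).get? x := by
  induction l1 with
  | nil =>
    have h0 : (PySem.Dict.mk ([] : List (Int × Int))).get? x = none := rfl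
    rw [List.nil_append, h0]
  | cons p t ih =>
    rcases p with ⟨a, b⟩
    rw [List.cons_append, PySem.Dict.get?_mk_cons, PySem.Dict.get?_mk_cons]
    by_cases h : a = x
    · simp [h]
    · simp only [beq_iff_eq, if_neg h]
      exact ih

theorem pvGet?_mk_const (nx : List Int) (c x : Int) (h : x ∈ nx) :
    (PySem.Dict.mk (nx.map (fun w => (w, c)))).get? x = some c := by
  induction nx with
  | nil => cases h
  | cons a t ih =>
    rw [List.map_cons, PySem.Dict.get?_mk_cons]
    by_cases ha : a = x
    · simp [ha]
    · simp only [beq_iff_eq, if_neg ha]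
      rcases List.mem_cons.mp h with h' | h'
      · exact absurd h'.symm ha
      · exact ih h'

def pvInv (graph : List (Int × List Int)) (k : Int) (d0 : List (Int × Int))
    (a : PySem.Dict Int Int × List Int) (b : List Int × List Int) : Prop :=
  a.1.items = d0 ++ b.2.map (fun w => (w, k + 1)) ∧
  a.2 = b.2 ∧
  b.1 = a.1.keys ∧
  (∀ w ∈ b.2, (PySem.Dict.mk d0).get? w = none) ∧
  b.2.Nodup ∧
  (∀ w ∈ b.2, w ∈ graph.flatMap Prod.snd)

theorem pvCorr_step (graph : List (Int × List Int)) (k : Int) (d0 : List (Int × Int))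
    (v w : Int) (a : PySem.Dict Int Int × List Int) (b : List Int × List Int)
    (hI : pvInv graph k d0 a b) (hv : (PySem.Dict.mk d0).get? v = some k)
    (hw : w ∈ graph.flatMap Prod.snd) :
    pvInv graph k d0 (pvStepA v a w) (pvStepB b w) := by
  obtain ⟨hit, hq, hk, hfr, hnd, hun⟩ := hI
  have ha1 : a.1 = PySem.Dict.mk (d0 ++ b.2.map (fun w => (w, k + 1))) :=
    PySem.Dict.ext hit
  have hget : ∀ x : Int, a.1.get? x =
      match (PySem.Dict.mk d0).get? x with
      | some y => some y
      | none => (PySem.Dict.mk (b.2.map (fun w => (w, k + 1)))).get? x := by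
    intro x; rw [ha1]; exact pvGet?_mk_append _ _ x
  by_cases hmem : w ∈ b.1
  · have hcont : a.1.contains w = true :=
      (PySem.Dict.contains_iff_mem_keys a.1 w).mpr (hk ▸ hmem)
    have hA : pvStepA v a w = a := by unfold pvStepA; simp [hcont]
    rw [hA, pvStepB_of_mem b w hmem]
    exact ⟨hit, hq, hk, hfr, hnd, hun⟩
  · have hkeys : w ∉ a.1.keys := hk ▸ hmem
    have hnone : a.1.get? w = none := (PySem.Dict.get?_eq_none_iff_not_mem_keys a.1 w).mpr hkeys
    have hcont : a.1.contains w = false := by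
      rw [PySem.Dict.contains_eq_isSome_get? a.1 w, hnone]; rfl
    have hwd0 : (PySem.Dict.mk d0).get? w = none := by
      have h2 := hget w
      rw [hnone] at h2
      cases h0 : (PySem.Dict.mk d0).get? w with
      | none => rfl
      | some y => rw [h0] at h2; simp at h2
    have hwnx : w ∉ b.2 := fun hx => by
      have h2 := hget w
      rw [hnone, hwd0, pvGet?_mk_const b.2 (k+1) w hx] at h2
      simp at h2
    have hgv : a.1.getD v 0 = k := by
      have h1 : a.1.get? v = some k := by rw [hget v, hv]
      rw [PySem.Dict.getD_eq_get?_getD, h1]; rfl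
    have hA : pvStepA v a w = (a.1.insert w (k + 1), a.2 ++ [w]) := by
      unfold pvStepA; simp [hcont, hgv]
    have hB : pvStepB b w = (b.1 ++ [w], b.2 ++ [w]) := pvStepB_of_not_mem b w hmem
    rw [hA, hB]
    have hitems : (a.1.insert w (k + 1)).items = a.1.items ++ [(w, k + 1)] :=
      PySem.Dict.items_insert_of_not_contains a.1 (k + 1) hcont
    refine ⟨?_, ?_, ?_, ?_, ?_, ?_⟩
    · rw [hitems, hit]
      simp [List.append_assoc]
    · rw [hq]
    · show b.1 ++ [w] = (a.1.insert w (k + 1)).keys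
      have : (a.1.insert w (k + 1)).keys = a.1.keys ++ [w] := by
        show (a.1.insert w (k + 1)).items.map Prod.fst = _
        rw [hitems]
        simp [PySem.Dict.keys]
      rw [this, hk]
    · intro x hx
      rcases List.mem_append.mp hx with hx | hx
      · exact hfr x hx
      · rw [List.mem_singleton.mp hx]; exact hwd0
    · rw [List.nodup_append]
      refine ⟨hnd, List.nodup_singleton w, ?_⟩
      intro x hx y hy
      rw [List.mem_singleton.mp hy]
      exact fun he => hwnx (he ▸ hx)
    · intro x hx
      rcases List.mem_append.mp hx with hx | hx
      · exact hun x hx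
      · rw [List.mem_singleton.mp hx]; exact hw

theorem pvCorr_nbrs (graph : List (Int × List Int)) (k : Int) (d0 : List (Int × Int))
    (v : Int) (nbrs : List Int) (hnb : ∀ w ∈ nbrs, w ∈ graph.flatMap Prod.snd)
    (hv : (PySem.Dict.mk d0).get? v = some k) :
    ∀ (a : PySem.Dict Int Int × List Int) (b : List Int × List Int),
      pvInv graph k d0 a b →
      pvInv graph k d0 (nbrs.foldl (pvStepA v) a) (nbrs.foldl pvStepB b) := by
  induction nbrs with
  | nil => exact fun a b h => h
  | cons w t ih =>
    intro a b hI
    simp only [List.foldl_cons]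
    exact ih (fun x hx => hnb x (List.mem_cons_of_mem _ hx)) _ _
      (pvCorr_step graph k d0 v w a b hI hv (hnb w List.mem_cons_self))

def pvLevelA (graph : List (Int × List Int)) (s : PySem.Dict Int Int × List Int) (v : Int) :
    PySem.Dict Int Int × List Int :=
  (pvNbrs graph v).foldl (pvStepA v) s

theorem pvCorr_level (graph : List (Int × List Int)) (k : Int) (d0 : List (Int × Int))
    (F : List Int) (hF : ∀ v ∈ F, (PySem.Dict.mk d0).get? v = some k) :
    ∀ (a : PySem.Dict Int Int × List Int) (b : List Int × List Int),
      pvInv graph k d0 a b →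
      pvInv graph k d0 (F.foldl (pvLevelA graph) a) (F.foldl (pvLevelB graph) b) := by
  induction F with
  | nil => exact fun a b h => h
  | cons v t ih =>
    intro a b hI
    simp only [List.foldl_cons]
    refine ih (fun x hx => hF x (List.mem_cons_of_mem _ hx)) _ _ ?_
    exact pvCorr_nbrs graph k d0 v (pvNbrs graph v)
      (fun w hw => pvNbrs_sub graph v w hw) (hF v List.mem_cons_self) a b hI

theorem pvFoldA_factor (nbrs : List Int) (v : Int) :
    ∀ (s : PySem.Dict Int Int × List Int) (pre : List Int),
      nbrs.foldl (pvStepA v) (s.1, pre ++ s.2) =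
        ((nbrs.foldl (pvStepA v) s).1, pre ++ (nbrs.foldl (pvStepA v) s).2) := by
  induction nbrs with
  | nil => intro s pre; rfl
  | cons w t ih =>
    intro s pre
    simp only [List.foldl_cons]
    by_cases hc : s.1.contains w = true
    · have h1 : pvStepA v (s.1, pre ++ s.2) w = (s.1, pre ++ s.2) := by
        unfold pvStepA; simp [hc]
      have h2 : pvStepA v s w = s := by unfold pvStepA; simp [hc]
      rw [h1, h2]
      exact ih s pre
    · have hc' : s.1.contains w = false := by simp at hc; exact hc
      have h1 : pvStepA v (s.1, pre ++ s.2) w =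
          (s.1.insert w (s.1.getD v 0 + 1), pre ++ (s.2 ++ [w])) := by
        unfold pvStepA; simp [hc', List.append_assoc]
      have h2 : pvStepA v s w = (s.1.insert w (s.1.getD v 0 + 1), s.2 ++ [w]) := by
        unfold pvStepA; simp [hc']
      rw [h1, h2]
      exact ih (s.1.insert w (s.1.getD v 0 + 1), s.2 ++ [w]) pre

theorem pvBfsA_level (graph : List (Int × List Int)) :
    ∀ (F : List Int) (d : PySem.Dict Int Int) (acc : List Int),
      pvBfsA graph d (F ++ acc) =
        pvBfsA graph (F.foldl (pvLevelA graph) (d, acc)).1 (F.foldl (pvLevelA graph) (d, acc)).2 := by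
  intro F
  induction F with
  | nil => intro d acc; rfl
  | cons v t ih =>
    intro d acc
    rw [List.cons_append, pvBfsA]
    have hf := pvFoldA_factor (pvNbrs graph v) v (d, acc) t
    simp only at hf
    rw [hf]
    rw [ih (pvNbrs graph v |>.foldl (pvStepA v) (d, acc)).1 (pvNbrs graph v |>.foldl (pvStepA v) (d, acc)).2]
    simp only [List.foldl_cons]
    rfl

theorem pvMax_eq (l : List Int) (k : Int) (hk : k ∈ l) (hle : ∀ x ∈ l, x ≤ k) :
    (PySem.List.max? l (fun x => x)).getD 0 = k := by
  cases hm : PySem.List.max? l (fun x => x) with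
  | none =>
    rw [PySem.List.max?_eq_none_iff] at hm
    subst hm; cases hk
  | some m =>
    have h1 := PySem.List.max?_isMax hm k hk
    have h2 := hle m (PySem.List.max?_mem hm)
    simpa using le_antisymm h2 h1

theorem pvMain (graph : List (Int × List Int)) :
    ∀ (n : Nat) (vis : List Int) (d : PySem.Dict Int Int) (F : List Int) (k : Int),
      pvMissS graph vis = n → vis = d.keys → F ≠ [] →
      (∀ v ∈ F, d.get? v = some k) → (∀ p ∈ d.items, p.2 ≤ k) →
      (PySem.List.max? (PySem.Dict.values (pvBfsA graph d F)) (fun x => x)).getD 0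
        = pvLevels graph vis F k := by
  intro n
  induction n using Nat.strong_induction_on with
  | _ n ih =>
  intro vis d F k hn hvis hF hFk hval
  have hstart : pvInv graph k d.items (d, []) (vis, []) := by
    refine ⟨by simp, rfl, hvis, ?_, List.nodup_nil, ?_⟩
    · intro w hw; cases hw
    · intro w hw; cases hw
  have hC := pvCorr_level graph k d.items F (fun v hvF => hFk v hvF) (d, []) (vis, []) hstart
  obtain ⟨hit, hq, hk2, hfr, hnd, hun⟩ := hC
  have hlevel := pvBfsA_level graph F d []
  rw [List.append_nil] at hlevel
  rw [hlevel, pvLevels]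
  have hfold : pvLevelFold graph vis F = F.foldl (pvLevelB graph) (vis, []) := rfl
  by_cases hnil : (F.foldl (pvLevelB graph) (vis, [])).2 = []
  · rw [hfold]
    rw [dif_pos hnil]
    have hdeq : (F.foldl (pvLevelA graph) (d, [])).1 = d := by
      apply PySem.Dict.ext
      rw [hit, hnil]
      simp
    rw [hq, hnil, hdeq, pvBfsA]
    obtain ⟨v, hvF⟩ := List.exists_mem_of_ne_nil F hF
    have hkv : k ∈ d.values := by
      have := PySem.Dict.mem_items_of_get?_eq_some d (hFk v hvF)
      exact List.mem_map_of_mem this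
    refine pvMax_eq _ k hkv ?_
    intro x hx
    obtain ⟨p, hp, hpx⟩ := List.mem_map.mp hx
    exact hpx ▸ hval p hp
  · rw [hfold, dif_neg hnil]
    set NX := (F.foldl (pvLevelB graph) (vis, [])).2 with hNX
    set D := (F.foldl (pvLevelA graph) (d, [])).1 with hD
    have hDmk : D = PySem.Dict.mk (d.items ++ NX.map (fun w => (w, k + 1))) :=
      PySem.Dict.ext hit
    have hget : ∀ x : Int, D.get? x =
        match d.get? x with
        | some y => some y
        | none => (PySem.Dict.mk (NX.map (fun w => (w, k + 1)))).get? x := by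
      intro x; rw [hDmk]; exact pvGet?_mk_append _ _ x
    have hkeysD : D.keys = vis ++ NX := by
      show D.items.map Prod.fst = _
      rw [hit]
      simp [hvis, PySem.Dict.keys, Function.comp_def]
    have hlt : pvMissS graph (F.foldl (pvLevelB graph) (vis, [])).1 < n := by
      rw [← hn]
      rw [hk2, hkeysD]
      obtain ⟨w, hwNX⟩ := List.exists_mem_of_ne_nil NX hnil
      refine pvCountP_lt (p := fun x => !(decide (x ∈ vis))) ?_ w ?_ ?_ ?_
      · intro a _ ha
        simp only [Bool.not_eq_true', decide_eq_false_iff_not] at ha ⊢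
        exact fun hmem => ha (List.mem_append_left _ hmem)
      · exact List.mem_append_right _ (hun w hwNX)
      · have : d.get? w = none := hfr w hwNX
        rw [PySem.Dict.get?_eq_none_iff_not_mem_keys] at this
        simp [hvis, this]
      · simp [List.mem_append_right _ hwNX]
    rw [hq]
    refine ih _ hlt (F.foldl (pvLevelB graph) (vis, [])).1 D NX (k + 1) rfl (by rw [hk2, hD]) hnil ?_ ?_
    · intro x hx
      rw [hget x, hfr x hx, pvGet?_mk_const NX (k + 1) x hx]
    · intro p hp
      rw [hDmk] at hp
      rcases List.mem_append.mp hp with hp | hp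
      · exact le_trans (hval p hp) (by omega)
      · obtain ⟨x, _, hx2⟩ := List.mem_map.mp hp
        rw [← hx2]

theorem pvEcc (graph : List (Int × List Int)) (v : Int) :
    (PySem.List.max? (PySem.Dict.values
        (pvBfsA graph ((PySem.Dict.empty : PySem.Dict Int Int).insert v 0) [v]))
      (fun x => x)).getD 0 = pvLevels graph [v] [v] 0 := by
  refine pvMain graph (pvMissS graph [v]) [v]
    ((PySem.Dict.empty : PySem.Dict Int Int).insert v 0) [v] 0 rfl ?_ (by simp) ?_ ?_
  · rfl
  · intro x hx
    rw [List.mem_singleton.mp hx]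
    exact PySem.Dict.get?_insert_self _ v 0
  · intro p hp
    have : p = (v, 0) := List.mem_singleton.mp hp
    rw [this]

-- ===== second half: B's Bellman-Ford rounds compute the level BFS value =====

-- membership characterisation of one BFS level
theorem pvMemFoldB1 (ws : List Int) :
    ∀ (s : List Int × List Int) (x : Int),
      x ∈ (ws.foldl pvStepB s).1 ↔ x ∈ s.1 ∨ x ∈ ws := by
  induction ws with
  | nil => intro s x; simp
  | cons w t ih =>
    intro s x
    simp only [List.foldl_cons]
    by_cases hw : w ∈ s.1
    · rw [pvStepB_of_mem s w hw, ih]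
      constructor
      · rintro (h | h) <;> simp [h]
      · rintro (h | h)
        · exact Or.inl h
        · rcases List.mem_cons.mp h with h | h
          · exact Or.inl (h ▸ hw)
          · exact Or.inr h
    · rw [pvStepB_of_not_mem s w hw, ih]
      simp only [List.mem_append, List.mem_cons]
      tauto

theorem pvMemFoldB2 (ws : List Int) :
    ∀ (s : List Int × List Int) (x : Int),
      x ∈ (ws.foldl pvStepB s).2 ↔ x ∈ s.2 ∨ (x ∈ ws ∧ x ∉ s.1) := by
  induction ws with
  | nil => intro s x; simp
  | cons w t ih =>
    intro s x
    simp only [List.foldl_cons]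
    by_cases hw : w ∈ s.1
    · rw [pvStepB_of_mem s w hw, ih]
      simp only [List.mem_cons]
      constructor
      · rintro (h | ⟨h1, h2⟩)
        · exact Or.inl h
        · exact Or.inr ⟨Or.inr h1, h2⟩
      · rintro (h | ⟨h1 | h1, h2⟩)
        · exact Or.inl h
        · exact absurd (h1 ▸ hw) h2
        · exact Or.inr ⟨h1, h2⟩
    · rw [pvStepB_of_not_mem s w hw, ih]
      simp only [List.mem_append, List.mem_cons]
      by_cases hxw : x = w <;> subst_eqs <;> tauto

theorem pvMemLF1 (graph : List (Int × List Int)) (F : List Int) :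
    ∀ (s : List Int × List Int) (x : Int),
      x ∈ (F.foldl (pvLevelB graph) s).1 ↔ x ∈ s.1 ∨ ∃ v ∈ F, x ∈ pvNbrs graph v := by
  induction F with
  | nil => intro s x; simp
  | cons v t ih =>
    intro s x
    simp only [List.foldl_cons]
    rw [ih]
    unfold pvLevelB
    rw [pvMemFoldB1]
    simp only [List.mem_cons]
    constructor
    · rintro ((h | h) | ⟨v', hv', hx⟩)
      · exact Or.inl h
      · exact Or.inr ⟨v, Or.inl rfl, h⟩
      · exact Or.inr ⟨v', Or.inr hv', hx⟩
    · rintro (h | ⟨v', hv' | hv', hx⟩)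
      · exact Or.inl (Or.inl h)
      · exact Or.inl (Or.inr (hv' ▸ hx))
      · exact Or.inr ⟨v', hv', hx⟩

theorem pvMemLF2 (graph : List (Int × List Int)) (F : List Int) :
    ∀ (s : List Int × List Int) (x : Int),
      x ∈ (F.foldl (pvLevelB graph) s).2 ↔
        x ∈ s.2 ∨ ((∃ v ∈ F, x ∈ pvNbrs graph v) ∧ x ∉ s.1) := by
  induction F with
  | nil => intro s x; simp
  | cons v t ih =>
    intro s x
    simp only [List.foldl_cons]
    rw [ih]
    unfold pvLevelB
    rw [pvMemFoldB2, pvMemFoldB1]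
    simp only [List.mem_cons]
    constructor
    · rintro ((h | ⟨h1, h2⟩) | ⟨⟨v', hv', hx⟩, h2⟩)
      · exact Or.inl h
      · exact Or.inr ⟨⟨v, Or.inl rfl, h1⟩, h2⟩
      · exact Or.inr ⟨⟨v', Or.inr hv', hx⟩, fun hs => h2 (Or.inl hs)⟩
    · rintro (h | ⟨⟨v', hv' | hv', hx⟩, h2⟩)
      · exact Or.inl (Or.inl h)
      · exact Or.inl (Or.inr ⟨hv' ▸ hx, h2⟩)
      · by_cases hxv : x ∈ pvNbrs graph v
        · exact Or.inl (Or.inr ⟨hxv, h2⟩)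
        · exact Or.inr ⟨⟨v', hv', hx⟩, fun h => (h.elim h2 hxv)⟩

-- the vertex universe of B
theorem pvMemVertsFold (l : List (List Int)) :
    ∀ (s : List Int) (x : Int),
      x ∈ l.foldl (fun s ws => PySem.Set.update s ws) s ↔ x ∈ s ∨ ∃ ws ∈ l, x ∈ ws := by
  induction l with
  | nil => intro s x; simp
  | cons ws t ih =>
    intro s x
    simp only [List.foldl_cons]
    rw [ih, PySem.Set.mem_update]
    simp only [List.mem_cons]
    constructor
    · rintro ((h | h) | ⟨ws', h1, h2⟩)
      · exact Or.inl h
      · exact Or.inr ⟨ws, Or.inl rfl, h⟩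
      · exact Or.inr ⟨ws', Or.inr h1, h2⟩
    · rintro (h | ⟨ws', h1 | h1, h2⟩)
      · exact Or.inl (Or.inl h)
      · exact Or.inl (Or.inr (h1 ▸ h2))
      · exact Or.inr ⟨ws', h1, h2⟩

theorem pvMemVerts (graph : List (Int × List Int)) (x : Int) :
    x ∈ pvVertsB graph ↔
      x ∈ (PySem.Dict.mk graph).keys ∨ ∃ ws ∈ PySem.Dict.values (PySem.Dict.mk graph), x ∈ ws := by
  unfold pvVertsB
  rw [pvMemVertsFold, PySem.Set.mem_ofList]

theorem pvNbrs_mem_verts (graph : List (Int × List Int)) (v x : Int)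
    (h : x ∈ pvNbrs graph v) : x ∈ pvVertsB graph := by
  unfold pvNbrs at h
  rw [PySem.Dict.getD_eq_get?_getD] at h
  cases hg : (PySem.Dict.mk graph).get? v with
  | none => rw [hg] at h; simp at h
  | some ws =>
    rw [hg] at h
    have hm := PySem.Dict.mem_items_of_get?_eq_some _ hg
    rw [pvMemVerts]
    exact Or.inr ⟨ws, List.mem_map_of_mem hm, h⟩

-- Bellman invariant machinery
def pvChar (d : PySem.Dict Int Int) (k : Int) (S : Int → Prop) (nd : PySem.Dict Int Int) : Prop :=
  ∀ x : Int,
    (∀ dx, d.get? x = some dx → nd.get? x = some dx) ∧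
    (d.get? x = none → ((S x ∧ nd.get? x = some (k + 1)) ∨ (¬ S x ∧ nd.get? x = none)))

def pvRel (graph : List (Int × List Int)) (d : PySem.Dict Int Int)
    (vis F : List Int) (k : Int) : Prop :=
  d.keys.Nodup ∧
  (∀ x, (d.get? x).isSome = true ↔ x ∈ vis) ∧
  (∀ x, d.get? x = some k ↔ x ∈ F) ∧
  (∀ x dx, d.get? x = some dx → dx ≤ k) ∧
  (∀ x dx, d.get? x = some dx → dx < k →
    ∀ w ∈ pvNbrs graph x, ∃ dw, d.get? w = some dw ∧ dw ≤ dx + 1)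

theorem pvChar_congr (d : PySem.Dict Int Int) (k : Int) (S S' : Int → Prop)
    (nd : PySem.Dict Int Int) (h : ∀ x, d.get? x = none → (S x ↔ S' x))
    (hC : pvChar d k S nd) : pvChar d k S' nd := by
  intro x
  refine ⟨(hC x).1, fun hf => ?_⟩
  rcases (hC x).2 hf with ⟨h1, h2⟩ | ⟨h1, h2⟩
  · exact Or.inl ⟨(h x hf).mp h1, h2⟩
  · exact Or.inr ⟨fun hs => h1 ((h x hf).mpr hs), h2⟩

theorem pvChar_init (d : PySem.Dict Int Int) (k : Int) : pvChar d k (fun _ => False) d := by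
  intro x
  exact ⟨fun dx h => h, fun hf => Or.inr ⟨not_false, hf⟩⟩

theorem pvInner_low (d : PySem.Dict Int Int) (k dv : Int) (S : Int → Prop) :
    ∀ (ws : List Int) (nd : PySem.Dict Int Int),
      (∀ w ∈ ws, ∃ dw, d.get? w = some dw ∧ ¬ (dv + 1 < dw)) →
      pvChar d k S nd →
      ws.foldl (pvRelaxStep dv) nd = nd := by
  intro ws
  induction ws with
  | nil => intro nd _ _; rfl
  | cons w t ih =>
    intro nd hws hC
    obtain ⟨dw, hdw, hlt⟩ := hws w List.mem_cons_self
    have hnd : nd.get? w = some dw := (hC w).1 dw hdw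
    have hstep : pvRelaxStep dv nd w = nd := by
      unfold pvRelaxStep
      rw [hnd]
      simp [if_neg hlt]
    simp only [List.foldl_cons, hstep]
    exact ih nd (fun a ha => hws a (List.mem_cons_of_mem _ ha)) hC

theorem pvInner_high (d : PySem.Dict Int Int) (k : Int)
    (Hval : ∀ x dx, d.get? x = some dx → dx ≤ k) :
    ∀ (ws : List Int) (S : Int → Prop) (nd : PySem.Dict Int Int),
      pvChar d k S nd →
      pvChar d k (fun x => S x ∨ x ∈ ws) (ws.foldl (pvRelaxStep k) nd) := by
  intro ws
  induction ws with
  | nil =>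
    intro S nd hC
    exact pvChar_congr d k S _ nd (fun x _ => by simp) hC
  | cons w t ih =>
    intro S nd hC
    simp only [List.foldl_cons]
    cases hdw : d.get? w with
    | some dw =>
      have hnd : nd.get? w = some dw := (hC w).1 dw hdw
      have hstep : pvRelaxStep k nd w = nd := by
        unfold pvRelaxStep
        rw [hnd]
        have := Hval w dw hdw
        simp [if_neg (by omega : ¬ (k + 1 < dw))]
      rw [hstep]
      refine pvChar_congr d k _ _ _ (fun x hf => ?_) (ih S nd hC)
      have hxw : x ≠ w := fun he => by rw [he, hdw] at hf; cases hf
      simp [List.mem_cons, hxw]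
    | none =>
      rcases (hC w).2 hdw with ⟨hSw, hnd⟩ | ⟨hSw, hnd⟩
      · have hstep : pvRelaxStep k nd w = nd := by
          unfold pvRelaxStep
          rw [hnd]
          simp
        rw [hstep]
        refine pvChar_congr d k _ _ _ (fun x hf => ?_) (ih S nd hC)
        simp only [List.mem_cons]
        constructor
        · rintro (h | h) <;> tauto
        · rintro (h | h | h)
          · exact Or.inl h
          · exact Or.inl (h ▸ hSw)
          · exact Or.inr h
      · have hstep : pvRelaxStep k nd w = nd.insert w (k + 1) := by
          unfold pvRelaxStep
          rw [hnd]
        rw [hstep]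
        have hC' : pvChar d k (fun x => S x ∨ x = w) (nd.insert w (k + 1)) := by
          intro x
          constructor
          · intro dx hdx
            have hxw : x ≠ w := fun he => by rw [he, hdw] at hdx; cases hdx
            rw [PySem.Dict.get?_insert_of_ne _ _ hxw]
            exact (hC x).1 dx hdx
          · intro hf
            by_cases hxw : x = w
            · subst hxw
              exact Or.inl ⟨Or.inr rfl, PySem.Dict.get?_insert_self _ _ _⟩
            · rw [PySem.Dict.get?_insert_of_ne _ _ hxw]
              rcases (hC x).2 hf with ⟨h1, h2⟩ | ⟨h1, h2⟩
              · exact Or.inl ⟨Or.inl h1, h2⟩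
              · exact Or.inr ⟨fun h => h.elim h1 hxw, h2⟩
        refine pvChar_congr d k _ _ _ (fun x hf => ?_) (ih _ _ hC')
        simp only [List.mem_cons]
        tauto

theorem pvOuter (graph : List (Int × List Int)) (d : PySem.Dict Int Int) (k : Int)
    (Hval : ∀ x dx, d.get? x = some dx → dx ≤ k)
    (Hclos : ∀ x dx, d.get? x = some dx → dx < k →
      ∀ w ∈ pvNbrs graph x, ∃ dw, d.get? w = some dw ∧ dw ≤ dx + 1) :
    ∀ (its : List (Int × List Int)) (S : Int → Prop) (nd : PySem.Dict Int Int),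
      (∀ p ∈ its, (PySem.Dict.mk graph).get? p.1 = some p.2) →
      pvChar d k S nd →
      pvChar d k (fun x => S x ∨ ∃ p ∈ its, d.get? p.1 = some k ∧ x ∈ p.2)
        (its.foldl (pvRelaxItem d) nd) := by
  intro its
  induction its with
  | nil =>
    intro S nd _ hC
    exact pvChar_congr d k S _ nd (fun x _ => by simp) hC
  | cons p t ih =>
    intro S nd hits hC
    have hp : (PySem.Dict.mk graph).get? p.1 = some p.2 := hits p List.mem_cons_self
    have hnbr : pvNbrs graph p.1 = p.2 := by
      unfold pvNbrs
      rw [PySem.Dict.getD_eq_get?_getD, hp]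
      rfl
    have ht : ∀ q ∈ t, (PySem.Dict.mk graph).get? q.1 = some q.2 :=
      fun q hq => hits q (List.mem_cons_of_mem _ hq)
    simp only [List.foldl_cons]
    cases hdp : d.get? p.1 with
    | none =>
      have hitem : pvRelaxItem d nd p = nd := by unfold pvRelaxItem; rw [hdp]
      rw [hitem]
      refine pvChar_congr d k _ _ _ (fun x hf => ?_) (ih S nd ht hC)
      constructor
      · rintro (h | ⟨q, h1, h2, h3⟩)
        · exact Or.inl h
        · exact Or.inr ⟨q, List.mem_cons_of_mem _ h1, h2, h3⟩
      · rintro (h | ⟨q, h1, h2, h3⟩)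
        · exact Or.inl h
        · rcases List.mem_cons.mp h1 with h1 | h1
          · rw [h1, hdp] at h2; cases h2
          · exact Or.inr ⟨q, h1, h2, h3⟩
    | some dv =>
      have hitem : pvRelaxItem d nd p = p.2.foldl (pvRelaxStep dv) nd := by
        unfold pvRelaxItem; rw [hdp]
      rw [hitem]
      have hdvk : dv ≤ k := Hval p.1 dv hdp
      rcases lt_or_eq_of_le hdvk with hlt | heq
      · have hid : p.2.foldl (pvRelaxStep dv) nd = nd := by
          refine pvInner_low d k dv S p.2 nd (fun w hw => ?_) hC
          obtain ⟨dw, h1, h2⟩ := Hclos p.1 dv hdp hlt w (hnbr ▸ hw)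
          exact ⟨dw, h1, by omega⟩
        rw [hid]
        refine pvChar_congr d k _ _ _ (fun x hf => ?_) (ih S nd ht hC)
        constructor
        · rintro (h | ⟨q, h1, h2, h3⟩)
          · exact Or.inl h
          · exact Or.inr ⟨q, List.mem_cons_of_mem _ h1, h2, h3⟩
        · rintro (h | ⟨q, h1, h2, h3⟩)
          · exact Or.inl h
          · rcases List.mem_cons.mp h1 with h1 | h1
            · rw [h1, hdp] at h2
              exact absurd (Option.some.inj h2) (by omega)
            · exact Or.inr ⟨q, h1, h2, h3⟩
      · subst heq
        have hhigh := pvInner_high d dv Hval p.2 S nd hC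
        refine pvChar_congr d dv _ _ _ (fun x hf => ?_) (ih _ _ ht hhigh)
        constructor
        · rintro ((h | h) | ⟨q, h1, h2, h3⟩)
          · exact Or.inl h
          · exact Or.inr ⟨p, List.mem_cons_self, hdp, h⟩
          · exact Or.inr ⟨q, List.mem_cons_of_mem _ h1, h2, h3⟩
        · rintro (h | ⟨q, h1, h2, h3⟩)
          · exact Or.inl (Or.inl h)
          · rcases List.mem_cons.mp h1 with h1 | h1
            · exact Or.inl (Or.inr (h1 ▸ h3))
            · exact Or.inr ⟨q, h1, h2, h3⟩

theorem pvRelaxChar (graph : List (Int × List Int)) (d : PySem.Dict Int Int)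
    (vis F : List Int) (k : Int) (hgnd : (PySem.Dict.mk graph).keys.Nodup)
    (hR : pvRel graph d vis F k) :
    pvChar d k (fun x => ∃ v ∈ F, x ∈ pvNbrs graph v) (pvRelax graph d) := by
  obtain ⟨hnd, hvis, hFc, hval, hclos⟩ := hR
  have hits : ∀ p ∈ (PySem.Dict.mk graph).items, (PySem.Dict.mk graph).get? p.1 = some p.2 := by
    intro p hp
    obtain ⟨a, b⟩ := p
    exact PySem.Dict.get?_of_mem_items _ hp hgnd
  have hout := pvOuter graph d k hval hclos (PySem.Dict.mk graph).items
    (fun _ => False) d hits (pvChar_init d k)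
  refine pvChar_congr d k _ _ _ (fun x hf => ?_) hout
  constructor
  · rintro (h | ⟨p, h1, h2, h3⟩)
    · cases h
    · refine ⟨p.1, (hFc p.1).mp h2, ?_⟩
      unfold pvNbrs
      rw [PySem.Dict.getD_eq_get?_getD, hits p h1]
      exact h3
  · rintro ⟨v, hvF, hx⟩
    unfold pvNbrs at hx
    rw [PySem.Dict.getD_eq_get?_getD] at hx
    cases hg : (PySem.Dict.mk graph).get? v with
    | none => rw [hg] at hx; simp at hx
    | some ws =>
      rw [hg] at hx
      exact Or.inr ⟨(v, ws), PySem.Dict.mem_items_of_get?_eq_some _ hg,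
        (hFc v).mpr hvF, hx⟩

-- keys of every relaxed dict stay duplicate-free
theorem pvStep_nodup (dv : Int) (nd : PySem.Dict Int Int) (w : Int)
    (h : nd.keys.Nodup) : (pvRelaxStep dv nd w).keys.Nodup := by
  unfold pvRelaxStep
  cases nd.get? w with
  | none => exact PySem.Dict.nodup_keys_insert _ _ _ h
  | some old =>
    show (if dv + 1 < old then nd.insert w (dv + 1) else nd).keys.Nodup
    by_cases hlt : dv + 1 < old
    · rw [if_pos hlt]
      exact PySem.Dict.nodup_keys_insert _ _ _ h
    · rw [if_neg hlt]
      exact h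

theorem pvInnerFold_nodup (dv : Int) (ws : List Int) :
    ∀ (nd : PySem.Dict Int Int), nd.keys.Nodup → (ws.foldl (pvRelaxStep dv) nd).keys.Nodup := by
  induction ws with
  | nil => exact fun nd h => h
  | cons w t ih =>
    intro nd h
    exact ih _ (pvStep_nodup dv nd w h)

theorem pvRelaxFold_nodup (d : PySem.Dict Int Int) (its : List (Int × List Int)) :
    ∀ nd : PySem.Dict Int Int, nd.keys.Nodup → (its.foldl (pvRelaxItem d) nd).keys.Nodup := by
  induction its with
  | nil => exact fun nd h => h
  | cons p t ih =>
    intro nd h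
    simp only [List.foldl_cons]
    refine ih _ ?_
    unfold pvRelaxItem
    cases d.get? p.1 with
    | none => exact h
    | some dv => exact pvInnerFold_nodup dv p.2 nd h

theorem pvRelax_nodup (graph : List (Int × List Int)) (d : PySem.Dict Int Int)
    (h : d.keys.Nodup) : (pvRelax graph d).keys.Nodup := by
  unfold pvRelax
  exact pvRelaxFold_nodup d _ d h

-- one relaxation round advances the invariant one BFS level
theorem pvRoundRel (graph : List (Int × List Int)) (d : PySem.Dict Int Int)
    (vis F : List Int) (k : Int) (hgnd : (PySem.Dict.mk graph).keys.Nodup)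
    (hR : pvRel graph d vis F k) :
    pvRel graph (pvRelax graph d) (pvLevelFold graph vis F).1 (pvLevelFold graph vis F).2 (k + 1) := by
  obtain ⟨hnd, hvis, hFc, hval, hclos⟩ := hR
  have hC := pvRelaxChar graph d vis F k hgnd ⟨hnd, hvis, hFc, hval, hclos⟩
  have hL1 : ∀ x, x ∈ (pvLevelFold graph vis F).1 ↔ x ∈ vis ∨ ∃ v ∈ F, x ∈ pvNbrs graph v := by
    intro x
    unfold pvLevelFold
    rw [pvMemLF1]
  have hL2 : ∀ x, x ∈ (pvLevelFold graph vis F).2 ↔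
      (∃ v ∈ F, x ∈ pvNbrs graph v) ∧ x ∉ vis := by
    intro x
    unfold pvLevelFold
    rw [pvMemLF2]
    simp
  have hget : ∀ x, (d.get? x).isSome = true →
      (pvRelax graph d).get? x = d.get? x := by
    intro x hx
    cases hdx : d.get? x with
    | none => rw [hdx] at hx; cases hx
    | some dx => exact (hC x).1 dx hdx
  refine ⟨pvRelax_nodup graph d hnd, ?_, ?_, ?_, ?_⟩
  · intro x
    rw [hL1]
    cases hdx : d.get? x with
    | some dx =>
      have h1 : (pvRelax graph d).get? x = some dx := (hC x).1 dx hdx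
      rw [h1]
      simp only [Option.isSome_some, true_iff]
      exact Or.inl ((hvis x).mp (by rw [hdx]; rfl))
    | none =>
      have hxv : x ∉ vis := fun h => by
        have := (hvis x).mpr h
        rw [hdx] at this
        cases this
      rcases (hC x).2 hdx with ⟨h1, h2⟩ | ⟨h1, h2⟩
      · rw [h2]
        simp only [Option.isSome_some, true_iff]
        exact Or.inr h1
      · rw [h2]
        simp only [Option.isSome_none, Bool.false_eq_true, false_iff]
        rintro (h | h)
        · exact hxv h
        · exact h1 h
  · intro x
    rw [hL2]
    cases hdx : d.get? x with
    | some dx =>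
      have h1 : (pvRelax graph d).get? x = some dx := (hC x).1 dx hdx
      have hdxk : dx ≤ k := hval x dx hdx
      rw [h1]
      constructor
      · intro h
        exact absurd (Option.some.inj h) (by omega)
      · rintro ⟨_, hxv⟩
        exact absurd ((hvis x).mp (by rw [hdx]; rfl)) hxv
    | none =>
      have hxv : x ∉ vis := fun h => by
        have := (hvis x).mpr h
        rw [hdx] at this
        cases this
      rcases (hC x).2 hdx with ⟨h1, h2⟩ | ⟨h1, h2⟩
      · rw [h2]
        simp only [true_iff]
        exact ⟨h1, hxv⟩
      · rw [h2]
        constructor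
        · intro h; cases h
        · rintro ⟨hS, _⟩
          exact absurd hS h1
  · intro x dx hdx
    cases hd : d.get? x with
    | some dy =>
      have := (hC x).1 dy hd
      rw [this] at hdx
      have := Option.some.inj hdx
      have := hval x dy hd
      omega
    | none =>
      rcases (hC x).2 hd with ⟨h1, h2⟩ | ⟨h1, h2⟩
      · rw [h2] at hdx
        have := Option.some.inj hdx
        omega
      · rw [h2] at hdx; cases hdx
  · intro x dx hdx hlt w hw
    cases hd : d.get? x with
    | some dy =>
      have hx1 : (pvRelax graph d).get? x = some dy := (hC x).1 dy hd
      rw [hx1] at hdx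
      have hxy : dx = dy := (Option.some.inj hdx).symm
      subst hxy
      have hdk : dx ≤ k := hval x dx hd
      rcases lt_or_eq_of_le hdk with h | h
      · obtain ⟨dw, hw1, hw2⟩ := hclos x dx hd h w hw
        exact ⟨dw, (hC w).1 dw hw1, hw2⟩
      · subst h
        cases hdw : d.get? w with
        | some dw =>
          refine ⟨dw, (hC w).1 dw hdw, ?_⟩
          have := hval w dw hdw
          omega
        | none =>
          rcases (hC w).2 hdw with ⟨h1, h2⟩ | ⟨h1, h2⟩
          · exact ⟨dx + 1, h2, le_refl _⟩
          · exact absurd ⟨x, (hFc x).mp hd, hw⟩ h1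
    | none =>
      rcases (hC x).2 hd with ⟨h1, h2⟩ | ⟨h1, h2⟩
      · rw [h2] at hdx
        have := Option.some.inj hdx
        omega
      · rw [h2] at hdx; cases hdx

-- once no frontier vertex has an unvisited neighbour, a relaxation round is the identity
theorem pvRelaxItem_id (graph : List (Int × List Int)) (d : PySem.Dict Int Int) (k : Int)
    (Hall : ∀ v dv, d.get? v = some dv → ∀ w ∈ pvNbrs graph v,
      ∃ dw, d.get? w = some dw ∧ ¬ (dv + 1 < dw)) :
    ∀ (its : List (Int × List Int)),
      (∀ p ∈ its, (PySem.Dict.mk graph).get? p.1 = some p.2) →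
      its.foldl (pvRelaxItem d) d = d := by
  intro its
  induction its with
  | nil => intro _; rfl
  | cons p t ih =>
    intro hits
    have hp := hits p List.mem_cons_self
    have hnbr : pvNbrs graph p.1 = p.2 := by
      unfold pvNbrs
      rw [PySem.Dict.getD_eq_get?_getD, hp]
      rfl
    have hitem : pvRelaxItem d d p = d := by
      unfold pvRelaxItem
      cases hdp : d.get? p.1 with
      | none => rfl
      | some dv =>
        exact pvInner_low d k dv (fun _ => False) p.2 d
          (fun w hw => Hall p.1 dv hdp w (hnbr ▸ hw)) (pvChar_init d k)
    simp only [List.foldl_cons, hitem]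
    exact ih (fun q hq => hits q (List.mem_cons_of_mem _ hq))

theorem pvRelax_fix (graph : List (Int × List Int)) (d : PySem.Dict Int Int)
    (vis F : List Int) (k : Int) (hgnd : (PySem.Dict.mk graph).keys.Nodup)
    (hR : pvRel graph d vis F k)
    (hstop : ∀ v ∈ F, ∀ w ∈ pvNbrs graph v, w ∈ vis) :
    pvRelax graph d = d := by
  obtain ⟨hnd, hvis, hFc, hval, hclos⟩ := hR
  unfold pvRelax
  refine pvRelaxItem_id graph d k ?_ _ ?_
  swap
  · intro p hp
    obtain ⟨a, b⟩ := p
    exact PySem.Dict.get?_of_mem_items _ hp hgnd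
  intro v dv hdv w hw
  have hdvk : dv ≤ k := hval v dv hdv
  rcases lt_or_eq_of_le hdvk with h | h
  · obtain ⟨dw, h1, h2⟩ := hclos v dv hdv h w hw
    exact ⟨dw, h1, by omega⟩
  · subst h
    have hvF : v ∈ F := (hFc v).mp hdv
    have hwvis : w ∈ vis := hstop v hvF w hw
    have hsome := (hvis w).mpr hwvis
    cases hdw : d.get? w with
    | none => rw [hdw] at hsome; cases hsome
    | some dw =>
      refine ⟨dw, rfl, ?_⟩
      have := hval w dw hdw
      omega

theorem pvRounds_fix (graph : List (Int × List Int)) (d : PySem.Dict Int Int)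
    (h : pvRelax graph d = d) : ∀ m, pvRounds graph m d = d := by
  intro m
  cases m with
  | zero => rfl
  | succ m =>
    show (if pvRelax graph d = d then d else pvRounds graph m (pvRelax graph d)) = d
    rw [if_pos h]

theorem pvMaxVals (graph : List (Int × List Int)) (d : PySem.Dict Int Int)
    (vis F : List Int) (k : Int) (hR : pvRel graph d vis F k) (hF : F ≠ []) :
    (PySem.List.max? d.values (fun x => x)).getD 0 = k := by
  obtain ⟨hnd, hvis, hFc, hval, hclos⟩ := hR
  obtain ⟨v, hvF⟩ := List.exists_mem_of_ne_nil F hF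
  have hkv : k ∈ d.values :=
    List.mem_map_of_mem (PySem.Dict.mem_items_of_get?_eq_some d ((hFc v).mpr hvF))
  refine pvMax_eq _ k hkv ?_
  intro x hx
  obtain ⟨p, hp, hpx⟩ := List.mem_map.mp hx
  obtain ⟨a, b⟩ := p
  exact hpx ▸ hval a b (PySem.Dict.get?_of_mem_items d hp hnd)

def pvMissU (graph : List (Int × List Int)) (vis : List Int) : Nat :=
  (pvVertsB graph).countP (fun x => !(decide (x ∈ vis)))

theorem pvSync (graph : List (Int × List Int)) (hgnd : (PySem.Dict.mk graph).keys.Nodup) :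
    ∀ (m : Nat) (d : PySem.Dict Int Int) (vis F : List Int) (k : Int),
      pvRel graph d vis F k → F ≠ [] → pvMissU graph vis < m →
      (PySem.List.max? (PySem.Dict.values (pvRounds graph m d)) (fun x => x)).getD 0
        = pvLevels graph vis F k := by
  intro m
  induction m with
  | zero => intro d vis F k _ _ h; omega
  | succ m ih =>
    intro d vis F k hR hF hm
    rw [pvLevels]
    by_cases hnil : (pvLevelFold graph vis F).2 = []
    · rw [dif_pos hnil]
      have hstop : ∀ v ∈ F, ∀ w ∈ pvNbrs graph v, w ∈ vis := by
        intro v hvF w hw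
        by_contra hwv
        have : w ∈ (pvLevelFold graph vis F).2 := by
          unfold pvLevelFold
          rw [pvMemLF2]
          simp only [List.not_mem_nil, false_or]
          exact ⟨⟨v, hvF, hw⟩, hwv⟩
        rw [hnil] at this
        cases this
      have hfix := pvRelax_fix graph d vis F k hgnd hR hstop
      rw [pvRounds_fix graph d hfix (m + 1)]
      exact pvMaxVals graph d vis F k hR hF
    · rw [dif_neg hnil]
      have hR' := pvRoundRel graph d vis F k hgnd hR
      have hsub : ∀ x ∈ vis, x ∈ (pvLevelFold graph vis F).1 := by
        intro x hx
        unfold pvLevelFold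
        rw [pvMemLF1]
        exact Or.inl hx
      obtain ⟨w, hwNX⟩ := List.exists_mem_of_ne_nil _ hnil
      have hw2 : (∃ v ∈ F, w ∈ pvNbrs graph v) ∧ w ∉ vis := by
        have hmw := hwNX
        unfold pvLevelFold at hmw
        rw [pvMemLF2] at hmw
        simpa using hmw
      obtain ⟨⟨v, hvF, hwv⟩, hwvis⟩ := hw2
      have hwU : w ∈ pvVertsB graph := pvNbrs_mem_verts graph v w hwv
      have hwL1 : w ∈ (pvLevelFold graph vis F).1 := by
        unfold pvLevelFold
        rw [pvMemLF1]
        exact Or.inr ⟨v, hvF, hwv⟩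
      have hlt : pvMissU graph (pvLevelFold graph vis F).1 < pvMissU graph vis := by
        refine pvCountP_lt (p := fun x => !(decide (x ∈ vis))) ?_ w hwU ?_ ?_
        · intro a _ ha
          simp only [Bool.not_eq_true', decide_eq_false_iff_not] at ha ⊢
          exact fun hmem => ha (hsub a hmem)
        · simp [hwvis]
        · simp [hwL1]
      have hdw : d.get? w = none := by
        cases hdw : d.get? w with
        | none => rfl
        | some dw =>
          exact absurd ((hR.2.1 w).mp (by rw [hdw]; rfl)) hwvis
      have hC := pvRelaxChar graph d vis F k hgnd hR
      have hwk : (pvRelax graph d).get? w = some (k + 1) := by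
        rcases (hC w).2 hdw with ⟨_, h2⟩ | ⟨h1, _⟩
        · exact h2
        · exact absurd ⟨v, hvF, hwv⟩ h1
      have hne : pvRelax graph d ≠ d := by
        intro he
        rw [he, hdw] at hwk
        cases hwk
      have hrw : pvRounds graph (m + 1) d = pvRounds graph m (pvRelax graph d) := by
        show (if pvRelax graph d = d then d else pvRounds graph m (pvRelax graph d)) = _
        rw [if_neg hne]
      rw [hrw]
      exact ih (pvRelax graph d) (pvLevelFold graph vis F).1 (pvLevelFold graph vis F).2 (k + 1)
        hR' hnil (by omega)

theorem pvRel_init (graph : List (Int × List Int)) (u : Int) :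
    pvRel graph ((PySem.Dict.empty : PySem.Dict Int Int).insert u 0) [u] [u] 0 := by
  have hget : ∀ x : Int, ((PySem.Dict.empty : PySem.Dict Int Int).insert u 0).get? x =
      if x = u then some 0 else none := by
    intro x
    by_cases h : x = u
    · subst h; simp [PySem.Dict.get?_insert_self]
    · rw [PySem.Dict.get?_insert_of_ne _ _ h, if_neg h]
      simp [PySem.Dict.get?_empty]
  refine ⟨?_, ?_, ?_, ?_, ?_⟩
  · exact PySem.Dict.nodup_keys_insert _ _ _ (by simp [PySem.Dict.keys_empty])
  · intro x
    rw [hget]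
    by_cases h : x = u <;> simp [h]
  · intro x
    rw [hget]
    by_cases h : x = u <;> simp [h]
  · intro x dx h
    rw [hget] at h
    by_cases hx : x = u
    · rw [if_pos hx] at h
      have := Option.some.inj h
      omega
    · rw [if_neg hx] at h; cases h
  · intro x dx h hlt
    rw [hget] at h
    by_cases hx : x = u
    · rw [if_pos hx] at h
      have := Option.some.inj h
      omega
    · rw [if_neg hx] at h; cases h

theorem pvMissU_init (graph : List (Int × List Int)) (u : Int)
    (hu : u ∈ pvVertsB graph) : pvMissU graph [u] < (pvVertsB graph).length := by
  have h := pvCountP_lt (l := pvVertsB graph)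
    (p := fun _ => true) (q := fun x => !(decide (x ∈ [u])))
    (fun a _ _ => rfl) u hu rfl (by simp)
  rw [List.countP_true] at h
  exact h

theorem pvEccB_eq (graph : List (Int × List Int)) (u : Int)
    (hgnd : (PySem.Dict.mk graph).keys.Nodup) (hu : u ∈ (PySem.Dict.mk graph).keys) :
    pvEccB graph (pvVertsB graph).length u = pvLevels graph [u] [u] 0 := by
  have huV : u ∈ pvVertsB graph := (pvMemVerts graph u).mpr (Or.inl hu)
  exact pvSync graph hgnd (pvVertsB graph).length _ [u] [u] 0
    (pvRel_init graph u) (by simp) (pvMissU_init graph u huV)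

theorem pvRadius_eq (graph : List (Int × List Int))
    (hgnd : (PySem.Dict.mk graph).keys.Nodup) :
    adjacency_dict_radius graph = adjacency_dict_radius_alt graph := by
  unfold adjacency_dict_radius adjacency_dict_radius_alt
  have hmap : (PySem.Dict.mk graph).keys.map (fun v =>
      (PySem.List.max? (PySem.Dict.values
          (pvBfsA graph ((PySem.Dict.empty : PySem.Dict Int Int).insert v 0) [v]))
        (fun x => x)).getD 0) =
      (PySem.Dict.mk graph).keys.map (fun v => pvEccB graph (pvVertsB graph).length v) := by
    refine List.map_congr_left (fun v hv => ?_)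
    rw [pvEcc graph v, pvEccB_eq graph v hgnd hv]
  rw [hmap]

-- ===== VERDICT (by name: the statement is the Claim_ definition above) =====
theorem adjacency_dict_radius_spec : Claim_equal_adjacency_dict_radius := by
  unfold Claim_equal_adjacency_dict_radius Spec_adjacency_dict_radius
  intro graph _ hPre
  refine pvRadius_eq graph ?_
  rw [PySem.Dict.keys_mk]
  exact hPre.2
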